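-- pv_equiv track=rewrite | github.com/algorithm-ssau/2026-6303-2-guitar-AGENT_TURBO | backend/search/search_reverb.py | _filter_by_queries
-- ===== SOURCE A (Python) =====
-- from typing import Any
--
-- def _filter_by_queries(
--     listings: list[dict[str, Any]],
--     search_queries: list[str],
-- ) -> list[dict[str, Any]]:
--     """
--     Фильтрует объявления по поисковым запросам (регистронезависимо).
--
--     Args:
--         listings: Список объявлений для фильтрации.
--         search_queries: Список поисковых запросов.
--
--     Returns:
--         Отфильтрованный список объявлений, где title содержит хотя бы один запрос.
--     """
--     if not search_queries:
--         return listings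
--
--     # Нормализуем запросы к нижнему регистру
--     queries_lower = [q.lower() for q in search_queries]
--
--     # Оставляем только те объявления, где title содержит хотя бы один запрос
--     result = []
--     for item in listings:
--         title_lower = item.get("title", "").lower()
--         if any(query in title_lower for query in queries_lower):
--             result.append(item)
--
--     return result
-- ===== SOURCE B (Python) =====
-- def _filter_by_queries(listings, search_queries):
--     if not search_queries:
--         return listings
--     # Lower every title once, then sweep query-by-query, marking matched indices.
--     titles = [item.get("title", "").lower() for item in listings]
--     matched = set()
--     for q in search_queries:
--         ql = q.lower()
--         for i, t in enumerate(titles):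
--             if i not in matched and ql in t:
--                 matched.add(i)
--     return [item for i, item in enumerate(listings) if i in matched]
-- ===== Notes on version B (the rewrite author's own statement) =====
-- stated objective: alternative
-- what changed: Inverts the loop nesting: instead of testing every query inside a per-listing loop, B lowers all titles once, sweeps query-by-query marking matched indices in a set (skipping already-matched ones), and finally emits listings whose index was marked, preserving order.
import Mathlib
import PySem

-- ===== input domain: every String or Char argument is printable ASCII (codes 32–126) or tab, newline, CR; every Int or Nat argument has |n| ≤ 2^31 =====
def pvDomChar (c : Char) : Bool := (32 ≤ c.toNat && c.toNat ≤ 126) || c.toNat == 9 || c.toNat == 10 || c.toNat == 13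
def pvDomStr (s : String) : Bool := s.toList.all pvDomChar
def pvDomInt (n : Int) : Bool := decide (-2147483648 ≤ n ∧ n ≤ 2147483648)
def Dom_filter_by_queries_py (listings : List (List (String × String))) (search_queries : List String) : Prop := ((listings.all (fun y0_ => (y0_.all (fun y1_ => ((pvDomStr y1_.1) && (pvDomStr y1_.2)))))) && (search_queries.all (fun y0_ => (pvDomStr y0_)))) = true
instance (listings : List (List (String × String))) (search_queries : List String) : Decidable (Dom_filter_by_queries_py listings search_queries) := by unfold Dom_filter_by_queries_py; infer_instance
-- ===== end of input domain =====

-- B inverts the loop nesting: it lowers all titles once, sweeps query-by-query marking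
-- matched indices in a set, and emits listings whose index was marked (order preserved).


-- item.get("title", "") on the dict-as-association-list (exact: PySem.Dict first-match lookup)
def pvTitleOf (item : List (String × String)) : String :=
  PySem.Dict.getD (PySem.Dict.mk item) "title" ""

-- ===== PORT A =====
def filter_by_queries_py (listings : List (List (String × String))) (search_queries : List String) : List (List (String × String)) :=
  if search_queries = [] then listings
  else
    let queries_lower := search_queries.map PySem.Str.lower
    listings.foldl (fun result item =>
      let title_lower := PySem.Str.lower (pvTitleOf item)
      if queries_lower.any (fun query => PySem.Str.isIn query title_lower) then result ++ [item]
      else result) []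

-- ===== PORT B =====
-- inner loop body: 'if i not in matched and ql in t: matched.add(i)'
def pvMatchStep (ql : String) (m : PySem.Set Int) (p : Int × String) : PySem.Set Int :=
  if !(PySem.Set.contains m p.1) && PySem.Str.isIn ql p.2 then PySem.Set.add m p.1 else m

def filter_by_queries_py_alt (listings : List (List (String × String))) (search_queries : List String) : List (List (String × String)) :=
  if search_queries = [] then listings
  else
    let titles := listings.map (fun item => PySem.Str.lower (pvTitleOf item))
    let matched := search_queries.foldl
      (fun m q => (PySem.List.enumerate titles).foldl (pvMatchStep (PySem.Str.lower q)) m)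
      PySem.Set.empty
    ((PySem.List.enumerate listings).filter (fun p => PySem.Set.contains matched p.1)).map (·.2)

-- ===== PRECONDITION & SPEC =====
def Spec_filter_by_queries_py (listings : List (List (String × String))) (search_queries : List String) (out : List (List (String × String))) : Prop := out = filter_by_queries_py_alt listings search_queries
instance (listings : List (List (String × String))) (search_queries : List String) (out : List (List (String × String))) : Decidable (Spec_filter_by_queries_py listings search_queries out) := by unfold Spec_filter_by_queries_py; infer_instance

-- ===== CLAIM (what is proved, stated in full; the proofs are below) =====
def Claim_equal_filter_by_queries_py : Prop := ∀ (listings : List (List (String × String))) (search_queries : List String), Dom_filter_by_queries_py listings search_queries → Spec_filter_by_queries_py listings search_queries (filter_by_queries_py listings search_queries)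

-- ===== LEMMAS AND PROOFS =====

-- membership after one step of the inner loop
lemma contains_matchStep (ql : String) (x : Int × String) (m : PySem.Set Int) (i : Int) :
    PySem.Set.contains (pvMatchStep ql m x) i
      = (PySem.Set.contains m i || (x.1 == i && PySem.Str.isIn ql x.2)) := by
  unfold pvMatchStep
  by_cases hq : PySem.Str.isIn ql x.2
  · by_cases hc : PySem.Set.contains m x.1
    · by_cases hi : x.1 = i
      · subst hi; simp_all
      · simp_all
    · by_cases hi : x.1 = i
      · subst hi; simp_all
      · simp_all [Ne.symm hi]
  · simp_all

-- membership after the inner sweep over one query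
lemma contains_foldl_matchStep (ql : String) (ps : List (Int × String)) (m : PySem.Set Int) (i : Int) :
    PySem.Set.contains (ps.foldl (pvMatchStep ql) m) i
      = (PySem.Set.contains m i || ps.any (fun x => x.1 == i && PySem.Str.isIn ql x.2)) := by
  induction ps generalizing m with
  | nil => simp
  | cons x t ih =>
    simp only [List.foldl_cons, List.any_cons, ih, contains_matchStep, Bool.or_assoc]

-- membership after the outer sweep over all queries
lemma contains_foldl_queries (ps : List (Int × String)) (qs : List String) (m : PySem.Set Int) (i : Int) :
    PySem.Set.contains (qs.foldl (fun m q => ps.foldl (pvMatchStep (PySem.Str.lower q)) m) m) i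
      = (PySem.Set.contains m i
          || qs.any (fun q => ps.any (fun x => x.1 == i && PySem.Str.isIn (PySem.Str.lower q) x.2))) := by
  induction qs generalizing m with
  | nil => simp
  | cons q t ih =>
    simp only [List.foldl_cons, List.any_cons, ih, contains_foldl_matchStep, Bool.or_assoc]

-- the per-index 'any' over enumerated titles is just the predicate at that index
lemma any_enumerate_index (f : List (String × String) → String) (P : String → Bool)
    (xs : List (List (String × String))) (s : Int) (k : Nat) (hk : k < xs.length) :
    (PySem.List.enumerate (xs.map f) s).any (fun x => x.1 == s + (k : Int) && P x.2) = P (f xs[k]) := by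
  rcases h : P (f xs[k]) with _ | _
  · rw [List.any_eq_false]
    intro x hx
    rw [PySem.List.mem_enumerate_iff] at hx
    obtain ⟨j, hj, rfl⟩ := hx
    simp only [Bool.and_eq_true, beq_iff_eq, not_and, Bool.not_eq_true]
    intro hji
    have : j = k := by omega
    subst this
    simpa using h
  · rw [List.any_eq_true]
    refine ⟨(s + (k : Int), (xs.map f)[k]'(by simpa using hk)), ?_, ?_⟩
    · rw [PySem.List.mem_enumerate_iff]
      exact ⟨k, by simpa using hk, rfl⟩
    · simpa using h
  
-- selecting enumerated pairs by a predicate on the element, then dropping the index, is filter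
lemma map_filter_enumerate {α : Type} (pred : α → Bool) (xs : List α) (s : Int) :
    ((PySem.List.enumerate xs s).filter (fun p => pred p.2)).map (·.2) = xs.filter pred := by
  induction xs generalizing s with
  | nil => simp [PySem.List.enumerate_nil]
  | cons x t ih =>
    rw [PySem.List.enumerate_cons]
    by_cases h : pred x <;> simp [h, ih]

-- the main pointwise/structural combination for B's final comprehension
lemma alt_result_eq (qs : List String) (xs : List (List (String × String))) :
    ((PySem.List.enumerate xs 0).filter (fun p =>
        PySem.Set.contains
          (qs.foldl (fun m q =>
              (PySem.List.enumerate (xs.map (fun item => PySem.Str.lower (pvTitleOf item))) 0).foldl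
                (pvMatchStep (PySem.Str.lower q)) m)
            PySem.Set.empty) p.1)).map (·.2)
      = xs.filter (fun item =>
          qs.any (fun q => PySem.Str.isIn (PySem.Str.lower q) (PySem.Str.lower (pvTitleOf item)))) := by
  have hcong : (PySem.List.enumerate xs 0).filter (fun p =>
        PySem.Set.contains
          (qs.foldl (fun m q =>
              (PySem.List.enumerate (xs.map (fun item => PySem.Str.lower (pvTitleOf item))) 0).foldl
                (pvMatchStep (PySem.Str.lower q)) m)
            PySem.Set.empty) p.1)
      = (PySem.List.enumerate xs 0).filter (fun p =>
          qs.any (fun q => PySem.Str.isIn (PySem.Str.lower q) (PySem.Str.lower (pvTitleOf p.2)))) := by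
    apply List.filter_congr
    intro p hp
    rw [PySem.List.mem_enumerate_iff] at hp
    obtain ⟨k, hk, rfl⟩ := hp
    rw [contains_foldl_queries]
    simp only [PySem.Set.empty, PySem.Set.contains, List.contains_nil, Bool.false_or]
    congr 1
    funext q
    exact any_enumerate_index _ _ xs 0 k hk
  rw [hcong]
  exact map_filter_enumerate (fun item => qs.any fun q => PySem.Str.isIn (PySem.Str.lower q) (PySem.Str.lower (pvTitleOf item))) xs 0

-- ===== VERDICT (by name: the statement is the Claim_ definition above) =====
theorem filter_by_queries_py_spec : Claim_equal_filter_by_queries_py := by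
  intro listings search_queries _
  unfold Spec_filter_by_queries_py filter_by_queries_py filter_by_queries_py_alt
  by_cases h : search_queries = []
  · simp [h]
  · simp only [if_neg h]
    rw [PySem.List.foldl_append_if_eq_filter, List.nil_append, alt_result_eq]
    congr 1
    funext item
    rw [List.any_map]
    rfl
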